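-- pv_equiv track=rewrite | github.com/rod-alm/advent_of_code | src/2023/Day 3/both.py | numbers_with_digit_positions
-- ===== SOURCE A (Python) =====
-- from typing import Iterator, Callable
--
-- def numbers_with_digit_positions(text: str) -> Iterator[tuple[int, list[int, int]]]:
--     """ yields each number in text and the corresponding digit positions """
--     for i, line in enumerate(text.strip().split("\n")):
--         num = ""
--         digit_positions = []
--         for j, chr in enumerate(line.strip()):
--             if chr.isdigit():
--                 digit_positions.append((i, j))
--                 num += chr
--             else:
--                 if num:
--                     yield (int(num), digit_positions)
--                     num = ""
--                     digit_positions = []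
--         if num:
--             yield (int(num), digit_positions)
-- ===== SOURCE B (Python) =====
-- def numbers_with_digit_positions(text):
--     """ yields each number in text and the corresponding digit positions """
--     for i, line in enumerate(text.strip().split("\n")):
--         line = line.strip()
--         n = len(line)
--         j = 0
--         while j < n:
--             if line[j].isdigit():
--                 k = j
--                 while k < n and line[k].isdigit():
--                     k += 1
--                 yield (int(line[j:k]), [(i, p) for p in range(j, k)])
--                 j = k
--             else:
--                 j += 1
-- ===== Notes on version B (the rewrite author's own statement) =====
-- stated objective: alternative
-- what changed: Replaces the per-character accumulate/flush state machine (growing a digit string and position list) with a two-pointer run scanner: find each maximal digit run, convert its slice once and emit its coordinate range.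
import Mathlib
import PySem

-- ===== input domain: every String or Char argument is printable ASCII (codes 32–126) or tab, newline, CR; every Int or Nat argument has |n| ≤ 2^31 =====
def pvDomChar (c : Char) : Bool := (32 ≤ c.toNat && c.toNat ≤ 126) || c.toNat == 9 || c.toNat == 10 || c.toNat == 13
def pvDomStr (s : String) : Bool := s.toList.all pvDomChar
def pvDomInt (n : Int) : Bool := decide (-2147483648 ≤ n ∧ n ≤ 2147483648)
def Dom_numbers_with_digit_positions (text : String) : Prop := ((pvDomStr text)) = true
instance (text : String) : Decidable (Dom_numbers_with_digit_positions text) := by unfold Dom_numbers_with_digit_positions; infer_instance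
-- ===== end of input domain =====

-- B replaces A's per-character accumulate/flush state machine by a maximal-digit-run scanner (alternative, same cost).

-- ===== PORT A =====
-- inner loop of A over the stripped line: state = (num, digit_positions); j is the enumerate index
def pvA_line (i : Int) : List Char → Int → List Char → List (Int × Int) → List (Int × List (Int × Int))
  | [], _, num, pos =>
      if num ≠ [] then [((PySem.Int.ofChars? num).getD 0, pos)] else []
  | c :: cs, j, num, pos =>
      if PySem.Chars.isdigit c then
        pvA_line i cs (j + 1) (num ++ [c]) (pos ++ [(i, j)])
      else
        (if num ≠ [] then [((PySem.Int.ofChars? num).getD 0, pos)] else []) ++ pvA_line i cs (j + 1) [] []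

def numbers_with_digit_positions (text : String) : List (Int × (List (Int × Int))) :=
  (PySem.List.enumerate (PySem.Chars.splitOn (PySem.Chars.strip text.toList) ['\n']) 0).flatMap
    (fun p => pvA_line p.1 (PySem.Chars.strip p.2) 0 [] [])

-- ===== PORT B =====
-- inner while-loop of B: the inner 'while k < n and line[k].isdigit(): k += 1' is the maximal
-- digit run, ported structurally as takeWhile/dropWhile; int(line[j:k]) is ofChars? of the run,
-- [(i, p) for p in range(j, k)] is the pyRange map
def pvB_runs (i : Int) : List Char → Int → List (Int × List (Int × Int))
  | [], _ => []
  | c :: cs, j =>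
      if PySem.Chars.isdigit c then
        let run := c :: cs.takeWhile PySem.Chars.isdigit
        ((PySem.Int.ofChars? run).getD 0,
         (PySem.List.pyRange j (j + run.length) 1).map (fun p => (i, p)))
          :: pvB_runs i (cs.dropWhile PySem.Chars.isdigit) (j + run.length)
      else
        pvB_runs i cs (j + 1)
termination_by cs => cs.length
decreasing_by
  · have := List.length_dropWhile_le (p := PySem.Chars.isdigit) (l := cs)
    simp; omega
  · simp

def numbers_with_digit_positions_alt (text : String) : List (Int × (List (Int × Int))) :=
  (PySem.List.enumerate (PySem.Chars.splitOn (PySem.Chars.strip text.toList) ['\n']) 0).flatMap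
    (fun p => pvB_runs p.1 (PySem.Chars.strip p.2) 0)

-- ===== PRECONDITION & SPEC =====
def Spec_numbers_with_digit_positions (text : String) (out : List (Int × (List (Int × Int)))) : Prop := out = numbers_with_digit_positions_alt text
instance (text : String) (out : List (Int × (List (Int × Int)))) : Decidable (Spec_numbers_with_digit_positions text out) := by unfold Spec_numbers_with_digit_positions; infer_instance

-- ===== CLAIM (what is proved, stated in full; the proofs are below) =====
def Claim_equal_numbers_with_digit_positions : Prop := ∀ (text : String), Dom_numbers_with_digit_positions text → Spec_numbers_with_digit_positions text (numbers_with_digit_positions text)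

-- ===== LEMMAS AND PROOFS =====

-- while accumulating a nonempty num, A keeps taking digits until the run ends, then emits
-- the whole run and restarts with empty state
lemma pvA_line_acc (i : Int) (cs : List Char) :
    ∀ (j : Int) (num : List Char) (pos : List (Int × Int)), num ≠ [] →
    pvA_line i cs j num pos =
      ((PySem.Int.ofChars? (num ++ cs.takeWhile PySem.Chars.isdigit)).getD 0,
        pos ++ (PySem.List.pyRange j (j + (cs.takeWhile PySem.Chars.isdigit).length) 1).map
          (fun p => (i, p)))
        :: pvA_line i (cs.dropWhile PySem.Chars.isdigit)
            (j + (cs.takeWhile PySem.Chars.isdigit).length) [] [] := by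
  induction cs with
  | nil =>
      intro j num pos h
      simp [pvA_line, h, PySem.List.pyRange_one_eq_nil]
  | cons c cs ih =>
      intro j num pos h
      by_cases hc : PySem.Chars.isdigit c = true
      · simp only [List.takeWhile_cons, List.dropWhile_cons, hc, if_true, pvA_line]
        rw [ih (j + 1) (num ++ [c]) (pos ++ [(i, j)]) (by simp)]
        push_cast [List.length_cons]
        have hT : j + (((List.takeWhile PySem.Chars.isdigit cs).length : Int) + 1)
            = (j + 1) + ((List.takeWhile PySem.Chars.isdigit cs).length : Int) := by ring
        have hcons := PySem.List.pyRange_one_cons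
          (a := j) (b := j + 1 + ((List.takeWhile PySem.Chars.isdigit cs).length : Int)) (by omega)
        rw [hT, hcons]
        simp
      · simp only [pvA_line, hc, List.takeWhile_cons, List.dropWhile_cons]
        simp [h, hc, pvA_line, PySem.List.pyRange_one_eq_nil]
lemma pvAB_line (i : Int) :
    ∀ (n : Nat) (cs : List Char), cs.length ≤ n → ∀ (j : Int),
    pvA_line i cs j [] [] = pvB_runs i cs j := by
  intro n
  induction n with
  | zero =>
      intro cs h j
      have : cs = [] := List.eq_nil_of_length_eq_zero (by omega)
      subst this; simp [pvA_line, pvB_runs]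
  | succ n ih =>
      intro cs h j
      cases cs with
      | nil => simp [pvA_line, pvB_runs]
      | cons c cs =>
          by_cases hc : PySem.Chars.isdigit c = true
          · simp only [pvA_line, pvB_runs, hc, if_true]
            simp only [List.nil_append]
            rw [pvA_line_acc i cs (j + 1) [c] [(i, j)] (by simp)]
            have hdrop : (cs.dropWhile PySem.Chars.isdigit).length ≤ n := by
              have := List.length_dropWhile_le (p := PySem.Chars.isdigit) (l := cs)
              simp at h; omega
            rw [ih _ hdrop]
            push_cast [List.length_cons]
            have hT : j + (((List.takeWhile PySem.Chars.isdigit cs).length : Int) + 1)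
                = (j + 1) + ((List.takeWhile PySem.Chars.isdigit cs).length : Int) := by ring
            have hcons := PySem.List.pyRange_one_cons
              (a := j) (b := j + 1 + ((List.takeWhile PySem.Chars.isdigit cs).length : Int)) (by omega)
            rw [hT, hcons]
            simp
          · simp only [pvA_line, pvB_runs, hc]
            simp
            exact ih cs (by simp at h; omega) (j + 1)

-- ===== VERDICT (by name: the statement is the Claim_ definition above) =====
theorem numbers_with_digit_positions_spec : Claim_equal_numbers_with_digit_positions := by
  intro text _
  unfold Spec_numbers_with_digit_positions numbers_with_digit_positions numbers_with_digit_positions_alt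
  congr 1
  funext p
  exact pvAB_line p.1 _ (PySem.Chars.strip p.2) le_rfl 0
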